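-- pv_equiv track=rewrite | github.com/pilipandr770/SecurityCheck | backend/services/ai_explainer.py | _generate_simple_summary
-- ===== SOURCE A (Python) =====
-- from typing import Dict, List
--
-- def _generate_simple_summary(results: List[Dict], domain: str, language: str = 'de') -> Dict:
--     """Простое резюме без AI"""
--     critical = sum(1 for r in results if r.get('severity') == 'critical')
--     high = sum(1 for r in results if r.get('severity') == 'high')
--     medium = sum(1 for r in results if r.get('severity') == 'medium')
--
--     if language == 'de':
--         if critical > 0:
--             summary = f'Schwerwiegende Sicherheitsprobleme auf der Website {domain} gefunden. Sofortiges Handeln erforderlich!'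
--         elif high > 0:
--             summary = f'Auf der Website {domain} wurden wichtige Sicherheitsprobleme gefunden, die behoben werden müssen.'
--         elif medium > 0:
--             summary = f'Die Website {domain} hat mehrere Sicherheitsprobleme mittlerer Wichtigkeit.'
--         else:
--             summary = f'Die Website {domain} hat grundlegenden Schutz, aber es gibt Verbesserungsmöglichkeiten.'
--
--         recommendations = 'Wir empfehlen, einen Sicherheitsspezialisten zu konsultieren, um die gefundenen Probleme zu beheben.'
--     else:
--         if critical > 0:
--             summary = f'Обнаружены серьёзные проблемы безопасности на сайте {domain}. Требуется немедленное вмешательство!'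
--         elif high > 0:
--             summary = f'На сайте {domain} найдены важные проблемы безопасности, которые нужно исправить.'
--         elif medium > 0:
--             summary = f'Сайт {domain} имеет несколько проблем безопасности средней важности.'
--         else:
--             summary = f'Сайт {domain} имеет базовую защиту, но есть возможности для улучшения.'
--
--         recommendations = 'Рекомендуем обратиться к специалисту по безопасности для устранения найденных проблем.'
--
--     return {'summary': summary, 'recommendations': recommendations}
-- ===== SOURCE B (Python) =====
-- from typing import Dict, List
--
-- _RANK = {'critical': 3, 'high': 2, 'medium': 1}
--
-- def _generate_simple_summary(results: List[Dict], domain: str, language: str = 'de') -> Dict: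
--     """Simple summary without AI: reduce results to a numeric maximum severity rank,
--     then index a rank-ordered message list."""
--     level = 0
--     for r in results:
--         level = max(level, _RANK.get(r.get('severity'), 0))
--     if language == 'de':
--         summaries = [
--             f'Die Website {domain} hat grundlegenden Schutz, aber es gibt Verbesserungsmöglichkeiten.',
--             f'Die Website {domain} hat mehrere Sicherheitsprobleme mittlerer Wichtigkeit.',
--             f'Auf der Website {domain} wurden wichtige Sicherheitsprobleme gefunden, die behoben werden müssen.',
--             f'Schwerwiegende Sicherheitsprobleme auf der Website {domain} gefunden. Sofortiges Handeln erforderlich!',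
--         ]
--         recommendations = 'Wir empfehlen, einen Sicherheitsspezialisten zu konsultieren, um die gefundenen Probleme zu beheben.'
--     else:
--         summaries = [
--             f'Сайт {domain} имеет базовую защиту, но есть возможности для улучшения.',
--             f'Сайт {domain} имеет несколько проблем безопасности средней важности.',
--             f'На сайте {domain} найдены важные проблемы безопасности, которые нужно исправить.',
--             f'Обнаружены серьёзные проблемы безопасности на сайте {domain}. Требуется немедленное вмешательство!',
--         ]
--         recommendations = 'Рекомендуем обратиться к специалисту по безопасности для устранения найденных проблем.'
--     return {'summary': summaries[level], 'recommendations': recommendations}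
-- ===== Notes on version B (the rewrite author's own statement) =====
-- stated objective: simpler
-- what changed: Replaces three severity-counting passes plus an if/elif cascade by a single max-reduction to a numeric severity rank (critical=3, high=2, medium=1, other=0) that directly indexes a rank-ordered list of summary strings.
import Mathlib
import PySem

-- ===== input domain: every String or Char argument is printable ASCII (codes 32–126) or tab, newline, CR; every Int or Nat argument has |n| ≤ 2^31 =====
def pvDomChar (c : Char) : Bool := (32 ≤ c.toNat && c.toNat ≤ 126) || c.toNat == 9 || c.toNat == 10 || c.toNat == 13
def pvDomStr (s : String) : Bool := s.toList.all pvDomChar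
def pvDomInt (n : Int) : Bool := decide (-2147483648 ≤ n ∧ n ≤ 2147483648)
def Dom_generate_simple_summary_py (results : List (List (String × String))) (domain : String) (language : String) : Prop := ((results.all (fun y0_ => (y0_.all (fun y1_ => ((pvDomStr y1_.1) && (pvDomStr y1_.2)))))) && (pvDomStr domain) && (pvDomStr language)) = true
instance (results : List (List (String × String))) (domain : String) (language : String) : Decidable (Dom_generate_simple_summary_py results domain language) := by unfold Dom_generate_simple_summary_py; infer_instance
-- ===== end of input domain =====

-- B replaces A's three severity counts + if/elif cascade by a single max-reduction to a numeric rank indexing a message list; objective: simpler.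


-- ===== PORT A =====
-- r.get('severity') : first-match association-list lookup (PySem.Dict over the literal dict)
def pvSevA (r : List (String × String)) : Option String := (PySem.Dict.mk r).get? "severity"

def generate_simple_summary_py (results : List (List (String × String))) (domain : String) (language : String) : List (String × String) :=
  let critical : Int := results.foldl (fun acc r => if pvSevA r == some "critical" then acc + 1 else acc) 0
  let high : Int := results.foldl (fun acc r => if pvSevA r == some "high" then acc + 1 else acc) 0
  let medium : Int := results.foldl (fun acc r => if pvSevA r == some "medium" then acc + 1 else acc) 0
  if language = "de" then
    let summary : String :=
      if critical > 0 then "Schwerwiegende Sicherheitsprobleme auf der Website " ++ domain ++ " gefunden. Sofortiges Handeln erforderlich!"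
      else if high > 0 then "Auf der Website " ++ domain ++ " wurden wichtige Sicherheitsprobleme gefunden, die behoben werden müssen."
      else if medium > 0 then "Die Website " ++ domain ++ " hat mehrere Sicherheitsprobleme mittlerer Wichtigkeit."
      else "Die Website " ++ domain ++ " hat grundlegenden Schutz, aber es gibt Verbesserungsmöglichkeiten."
    [("summary", summary), ("recommendations", "Wir empfehlen, einen Sicherheitsspezialisten zu konsultieren, um die gefundenen Probleme zu beheben.")]
  else
    let summary : String :=
      if critical > 0 then "Обнаружены серьёзные проблемы безопасности на сайте " ++ domain ++ ". Требуется немедленное вмешательство!"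
      else if high > 0 then "На сайте " ++ domain ++ " найдены важные проблемы безопасности, которые нужно исправить."
      else if medium > 0 then "Сайт " ++ domain ++ " имеет несколько проблем безопасности средней важности."
      else "Сайт " ++ domain ++ " имеет базовую защиту, но есть возможности для улучшения."
    [("summary", summary), ("recommendations", "Рекомендуем обратиться к специалисту по безопасности для устранения найденных проблем.")]

-- ===== PORT B =====
-- _RANK.get(r.get('severity'), 0): the outer get's key may be None, on which the 3-entry
-- dict lookup always misses; the match makes that explicit (exact for every input).
def pvRankB (r : List (String × String)) : Nat :=
  match (PySem.Dict.mk r).get? "severity" with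
  | some s => (PySem.Dict.mk [("critical", 3), ("high", 2), ("medium", 1)]).getD s 0
  | none => 0

def generate_simple_summary_py_alt (results : List (List (String × String))) (domain : String) (language : String) : List (String × String) :=
  let level : Nat := results.foldl (fun acc r => max acc (pvRankB r)) 0
  if language = "de" then
    let summaries : List String :=
      [ "Die Website " ++ domain ++ " hat grundlegenden Schutz, aber es gibt Verbesserungsmöglichkeiten."
      , "Die Website " ++ domain ++ " hat mehrere Sicherheitsprobleme mittlerer Wichtigkeit."
      , "Auf der Website " ++ domain ++ " wurden wichtige Sicherheitsprobleme gefunden, die behoben werden müssen."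
      , "Schwerwiegende Sicherheitsprobleme auf der Website " ++ domain ++ " gefunden. Sofortiges Handeln erforderlich!" ]
    [("summary", summaries.getD level ""), ("recommendations", "Wir empfehlen, einen Sicherheitsspezialisten zu konsultieren, um die gefundenen Probleme zu beheben.")]
  else
    let summaries : List String :=
      [ "Сайт " ++ domain ++ " имеет базовую защиту, но есть возможности для улучшения."
      , "Сайт " ++ domain ++ " имеет несколько проблем безопасности средней важности."
      , "На сайте " ++ domain ++ " найдены важные проблемы безопасности, которые нужно исправить."
      , "Обнаружены серьёзные проблемы безопасности на сайте " ++ domain ++ ". Требуется немедленное вмешательство!" ]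
    [("summary", summaries.getD level ""), ("recommendations", "Рекомендуем обратиться к специалисту по безопасности для устранения найденных проблем.")]

-- ===== PRECONDITION & SPEC =====
def Spec_generate_simple_summary_py (results : List (List (String × String))) (domain : String) (language : String) (out : List (String × String)) : Prop := out = generate_simple_summary_py_alt results domain language
instance (results : List (List (String × String))) (domain : String) (language : String) (out : List (String × String)) : Decidable (Spec_generate_simple_summary_py results domain language out) := by unfold Spec_generate_simple_summary_py; infer_instance

-- ===== CLAIM =====
def Claim_equal_generate_simple_summary_py : Prop := ∀ (results : List (List (String × String))) (domain : String) (language : String), Dom_generate_simple_summary_py results domain language → Spec_generate_simple_summary_py results domain language (generate_simple_summary_py results domain language)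

-- ===== LEMMAS AND PROOFS =====

theorem pvRankB_le (r : List (String × String)) : pvRankB r ≤ 3 := by
  unfold pvRankB
  cases h : (PySem.Dict.mk r).get? "severity" with
  | none => simp
  | some s =>
    simp only [PySem.Dict.getD, PySem.Dict.get?, List.find?]
    cases hb1 : ("critical" == s) <;> cases hb2 : ("high" == s) <;> cases hb3 : ("medium" == s) <;>
      simp_all


theorem pvRankB_eq_three (r : List (String × String)) :
    (3 ≤ pvRankB r) ↔ pvSevA r = some "critical" := by
  unfold pvRankB pvSevA
  cases h : (PySem.Dict.mk r).get? "severity" with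
  | none => simp
  | some s =>
    simp only [PySem.Dict.getD, PySem.Dict.get?, List.find?]
    cases hb1 : ("critical" == s) <;> cases hb2 : ("high" == s) <;> cases hb3 : ("medium" == s) <;>
      simp_all <;> aesop


theorem pvRankB_ge_two (r : List (String × String)) :
    (2 ≤ pvRankB r) ↔ (pvSevA r = some "critical" ∨ pvSevA r = some "high") := by
  unfold pvRankB pvSevA
  cases h : (PySem.Dict.mk r).get? "severity" with
  | none => simp
  | some s =>
    simp only [PySem.Dict.getD, PySem.Dict.get?, List.find?]
    cases hb1 : ("critical" == s) <;> cases hb2 : ("high" == s) <;> cases hb3 : ("medium" == s) <;>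
      simp_all <;> aesop


theorem pvRankB_ge_one (r : List (String × String)) :
    (1 ≤ pvRankB r) ↔ (pvSevA r = some "critical" ∨ pvSevA r = some "high" ∨ pvSevA r = some "medium") := by
  unfold pvRankB pvSevA
  cases h : (PySem.Dict.mk r).get? "severity" with
  | none => simp
  | some s =>
    simp only [PySem.Dict.getD, PySem.Dict.get?, List.find?]
    cases hb1 : ("critical" == s) <;> cases hb2 : ("high" == s) <;> cases hb3 : ("medium" == s) <;>
      simp_all <;> aesop

-- k ≤ foldl max over a list iff the seed or some element reaches k
theorem pv_le_foldl_max (l : List (List (String × String))) (a k : Nat) :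
    k ≤ l.foldl (fun acc r => max acc (pvRankB r)) a ↔ (k ≤ a ∨ ∃ r ∈ l, k ≤ pvRankB r) := by
  induction l generalizing a with
  | nil => simp
  | cons x xs ih =>
    simp only [List.foldl_cons, ih, le_max_iff, List.mem_cons]
    constructor
    · rintro ((h | h) | ⟨r, hr, hk⟩)
      · exact Or.inl h
      · exact Or.inr ⟨x, Or.inl rfl, h⟩
      · exact Or.inr ⟨r, Or.inr hr, hk⟩
    · rintro (h | ⟨r, (rfl | hr), hk⟩)
      · exact Or.inl (Or.inl h)
      · exact Or.inl (Or.inr hk)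
      · exact Or.inr ⟨r, hr, hk⟩

theorem pv_foldl_max_le_aux (l : List (List (String × String))) :
    ∀ a : Nat, a ≤ 3 → l.foldl (fun acc r => max acc (pvRankB r)) a ≤ 3 := by
  induction l with
  | nil => intro a ha; simpa using ha
  | cons x xs ih =>
    intro a ha
    exact ih (max a (pvRankB x)) (by have := pvRankB_le x; omega)

theorem pv_foldl_max_le (l : List (List (String × String))) :
    l.foldl (fun acc r => max acc (pvRankB r)) 0 ≤ 3 :=
  pv_foldl_max_le_aux l 0 (by omega)

-- the summary selection: A's count cascade equals B's list index at the max rank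
theorem pv_select (results : List (List (String × String))) (s0 s1 s2 s3 : String) :
    (if (0:Int) < results.foldl (fun acc r => if pvSevA r == some "critical" then acc + 1 else acc) 0 then s3
     else if (0:Int) < results.foldl (fun acc r => if pvSevA r == some "high" then acc + 1 else acc) 0 then s2
     else if (0:Int) < results.foldl (fun acc r => if pvSevA r == some "medium" then acc + 1 else acc) 0 then s1
     else s0)
    = [s0, s1, s2, s3].getD (results.foldl (fun acc r => max acc (pvRankB r)) 0) "" := by
  set m := results.foldl (fun acc r => max acc (pvRankB r)) 0 with hm
  have hle : m ≤ 3 := pv_foldl_max_le results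
  have hcnt : ∀ s : String,
      ((0:Int) < results.foldl (fun acc r => if pvSevA r == some s then acc + 1 else acc) 0) ↔
      ∃ r ∈ results, pvSevA r = some s := by
    intro s
    rw [PySem.List.foldl_if_add_one]
    simp [List.countP_pos_iff]
  have hchar : ∀ k : Nat, k ≤ m ↔ (k ≤ 0 ∨ ∃ r ∈ results, k ≤ pvRankB r) := by
    intro k
    rw [hm, pv_le_foldl_max]
  by_cases h3 : ∃ r ∈ results, pvSevA r = some "critical"
  · have hm3 : m = 3 := by
      have : 3 ≤ m := (hchar 3).mpr (Or.inr (by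
        obtain ⟨r, hr, hs⟩ := h3
        exact ⟨r, hr, (pvRankB_eq_three r).mpr hs⟩))
      omega
    rw [if_pos ((hcnt "critical").mpr h3), hm3]
    rfl
  · rw [if_neg (by rw [hcnt]; exact h3)]
    by_cases h2 : ∃ r ∈ results, pvSevA r = some "high"
    · have hm2 : m = 2 := by
        have hge : 2 ≤ m := (hchar 2).mpr (Or.inr (by
          obtain ⟨r, hr, hs⟩ := h2
          exact ⟨r, hr, (pvRankB_ge_two r).mpr (Or.inr hs)⟩))
        have hlt : ¬ 3 ≤ m := by
          intro hc
          obtain ⟨r, hr, hk⟩ := ((hchar 3).mp hc).resolve_left (by omega)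
          exact h3 ⟨r, hr, (pvRankB_eq_three r).mp hk⟩
        omega
      rw [if_pos ((hcnt "high").mpr h2), hm2]
      rfl
    · rw [if_neg (by rw [hcnt]; exact h2)]
      by_cases h1 : ∃ r ∈ results, pvSevA r = some "medium"
      · have hm1 : m = 1 := by
          have hge : 1 ≤ m := (hchar 1).mpr (Or.inr (by
            obtain ⟨r, hr, hs⟩ := h1
            exact ⟨r, hr, (pvRankB_ge_one r).mpr (Or.inr (Or.inr hs))⟩))
          have hlt : ¬ 2 ≤ m := by
            intro hc
            obtain ⟨r, hr, hk⟩ := ((hchar 2).mp hc).resolve_left (by omega)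
            rcases (pvRankB_ge_two r).mp hk with hs | hs
            · exact h3 ⟨r, hr, hs⟩
            · exact h2 ⟨r, hr, hs⟩
          omega
        rw [if_pos ((hcnt "medium").mpr h1), hm1]
        rfl
      · rw [if_neg (by rw [hcnt]; exact h1)]
        have hm0 : m = 0 := by
          by_contra hne
          have hge : 1 ≤ m := by omega
          obtain ⟨r, hr, hk⟩ := ((hchar 1).mp hge).resolve_left (by omega)
          rcases (pvRankB_ge_one r).mp hk with hs | hs | hs
          · exact h3 ⟨r, hr, hs⟩
          · exact h2 ⟨r, hr, hs⟩
          · exact h1 ⟨r, hr, hs⟩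
        rw [hm0]
        rfl

theorem pv_equal (results : List (List (String × String))) (domain : String) (language : String) :
    generate_simple_summary_py results domain language = generate_simple_summary_py_alt results domain language := by
  unfold generate_simple_summary_py generate_simple_summary_py_alt
  simp only [gt_iff_lt]
  by_cases hl : language = "de"
  · rw [if_pos hl, if_pos hl, pv_select]
  · rw [if_neg hl, if_neg hl, pv_select]

-- ===== VERDICT =====
theorem generate_simple_summary_py_spec : Claim_equal_generate_simple_summary_py := by
  intro results domain language _
  unfold Spec_generate_simple_summary_py
  exact pv_equal results domain language
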